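-- pv_equiv track=rewrite | github.com/aesara-devs/aesara | theano/tensor/opt.py | simplify_factors
-- ===== SOURCE A (Python) =====
-- def simplify_factors(num, denum):
--     """
--     For any Variable r which is both in num and denum, removes it
--     from both lists. Modifies the lists inplace. Returns the
--     modified lists. For example:
--
--     | [x], [x] -> [], []
--     | [x, y], [x] -> [y], []
--     | [a, b], [c, d] -> [a, b], [c, d]
--
--     """
--     ln = len(num)
--     ld = len(denum)
--     if ld > 2 and ln > 2:
--         # Faster version for "big" inputs.
--         while True:
--             s = set(num)
--             # Inputs can appear multiple times
--             redo = len(s) != len(num)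
--             inter = s.intersection(denum)
--             for v in inter:
--                 num.remove(v)
--                 denum.remove(v)
--             if not redo or not inter:
--                 break
--     else:
--         for v in list(num):
--             if v in denum:
--                 num.remove(v)
--                 denum.remove(v)
--     return num, denum
-- ===== SOURCE B (Python) =====
-- def simplify_factors(num, denum):
--     """Counter-based multiset cancellation in one linear sweep per list:
--     removes, for each value, its first min(multiplicity in num, multiplicity
--     in denum) occurrences from both lists (in place), preserving order."""
--     cd = {}
--     for v in denum:
--         cd[v] = cd.get(v, 0) + 1
--     new_num = []
--     take = {}
--     for v in num:
--         if take.get(v, 0) < cd.get(v, 0):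
--             take[v] = take.get(v, 0) + 1
--         else:
--             new_num.append(v)
--     new_denum = []
--     for v in denum:
--         if take.get(v, 0) > 0:
--             take[v] -= 1
--         else:
--             new_denum.append(v)
--     num[:] = new_num
--     denum[:] = new_denum
--     return num, denum
-- ===== Notes on version B (the rewrite author's own statement) =====
-- stated objective: faster
-- what changed: Replaced A's repeated list.remove scans (set-intersection while-loop / nested membership loop) by one counting dict over denum and a single capped-counter sweep over each list that skips the first min-count occurrences.
import Mathlib
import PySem

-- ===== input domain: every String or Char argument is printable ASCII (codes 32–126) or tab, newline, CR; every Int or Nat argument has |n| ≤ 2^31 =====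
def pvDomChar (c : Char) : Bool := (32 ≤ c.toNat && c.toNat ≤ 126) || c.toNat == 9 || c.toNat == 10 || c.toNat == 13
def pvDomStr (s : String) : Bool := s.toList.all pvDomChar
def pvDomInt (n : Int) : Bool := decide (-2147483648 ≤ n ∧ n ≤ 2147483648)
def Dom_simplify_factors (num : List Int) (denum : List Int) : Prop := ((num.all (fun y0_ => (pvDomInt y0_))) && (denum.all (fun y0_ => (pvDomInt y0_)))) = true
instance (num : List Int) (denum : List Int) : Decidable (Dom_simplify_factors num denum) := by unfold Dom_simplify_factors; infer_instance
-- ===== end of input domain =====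

-- B replaces A's repeated list.remove scans by one counting dict and a single
-- capped-counter sweep per list (O(n+m) instead of O(n*m)); A mutates its
-- argument lists in place, B performs the same in-place replacement, and the
-- equivalence proved here is about the returned pair.
-- A's big branch iterates over a Python set (hash order); the port iterates it
-- in first-occurrence order, which is exact because each step removes the
-- first occurrence of a distinct value, so the result is order-independent.


-- ===== PORT A =====
-- num.remove(v); denum.remove(v)  (first occurrence; in A, v is always present)
def pvRemoveBoth (st : List Int × List Int) (v : Int) : List Int × List Int :=
  ((PySem.List.remove? st.1 v).getD st.1, (PySem.List.remove? st.2 v).getD st.2)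

-- the 'while True' loop of the big branch; each recursive call strictly
-- shrinks num, so fuel = num.length + 1 never runs out
def pvBigLoop : Nat → List Int → List Int → List Int × List Int
  | 0, num, denum => (num, denum)
  | fuel+1, num, denum =>
      let s := PySem.Set.ofList num
      let redo : Bool := decide (PySem.Set.len s ≠ (num.length : Int))
      let inter := PySem.Set.inter s denum
      let st := inter.foldl pvRemoveBoth (num, denum)
      if !redo || inter.isEmpty then st else pvBigLoop fuel st.1 st.2

def simplify_factors (num : List Int) (denum : List Int) : List Int × List Int :=
  if denum.length > 2 ∧ num.length > 2 then
    pvBigLoop (num.length + 1) num denum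
  else
    num.foldl (fun st v => if v ∈ st.2 then pvRemoveBoth st v else st) (num, denum)

-- ===== PORT B =====
-- cd[v] = cd.get(v, 0) + 1  over denum
def pvCounter (xs : List Int) : PySem.Dict Int Int :=
  xs.foldl (fun d v => d.insert v (d.getD v 0 + 1)) PySem.Dict.empty

-- first pass of Source B: keep v unless take[v] can still grow below cd[v]
def pvTakeStep (cd : PySem.Dict Int Int) (st : List Int × PySem.Dict Int Int) (v : Int) :
    List Int × PySem.Dict Int Int :=
  if st.2.getD v 0 < cd.getD v 0 then (st.1, st.2.insert v (st.2.getD v 0 + 1))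
  else (st.1 ++ [v], st.2)

-- second pass of Source B: skip v while take[v] > 0, decrementing
def pvDropStep (st : List Int × PySem.Dict Int Int) (v : Int) :
    List Int × PySem.Dict Int Int :=
  if st.2.getD v 0 > 0 then (st.1, st.2.insert v (st.2.getD v 0 - 1))
  else (st.1 ++ [v], st.2)

def simplify_factors_alt (num : List Int) (denum : List Int) : List Int × List Int :=
  let cd := pvCounter denum
  let p1 := num.foldl (pvTakeStep cd) ([], PySem.Dict.empty)
  let p2 := denum.foldl pvDropStep ([], p1.2)
  (p1.1, p2.1)

-- ===== PRECONDITION & SPEC =====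
def Spec_simplify_factors (num : List Int) (denum : List Int) (out : List Int × List Int) : Prop := out = simplify_factors_alt num denum
instance (num : List Int) (denum : List Int) (out : List Int × List Int) : Decidable (Spec_simplify_factors num denum out) := by unfold Spec_simplify_factors; infer_instance

-- ===== CLAIM (what is proved, stated in full; the proofs are below) =====
def Claim_equal_simplify_factors : Prop := ∀ (num : List Int) (denum : List Int), Dom_simplify_factors num denum → Spec_simplify_factors num denum (simplify_factors num denum)

-- ===== LEMMAS AND PROOFS =====

-- canonical form both programs compute: strip, for each value v, the first
-- k v occurrences of v from the list
def bdec (k : Int → Nat) (x : Int) : Int → Nat := fun v => if v = x then k v - 1 else k v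

def stripF : List Int → (Int → Nat) → List Int
  | [], _ => []
  | x :: xs, k => if k x = 0 then x :: stripF xs k else stripF xs (bdec k x)

-- the common budget: min multiplicity
def mB (num denum : List Int) : Int → Nat := fun v => min (num.count v) (denum.count v)

theorem stripF_cons_zero {x : Int} {k : Int → Nat} (xs : List Int) (h : k x = 0) :
    stripF (x :: xs) k = x :: stripF xs k := by simp [stripF, h]

theorem stripF_cons_pos {x : Int} {k : Int → Nat} (xs : List Int) (h : ¬ k x = 0) :
    stripF (x :: xs) k = stripF xs (bdec k x) := by simp [stripF, h]

theorem stripF_zero (l : List Int) : stripF l (fun _ => 0) = l := by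
  induction l with
  | nil => rfl
  | cons x xs ih => simp [stripF, ih]

theorem stripF_count (l : List Int) (k : Int → Nat) (v : Int) :
    (stripF l k).count v = l.count v - min (k v) (l.count v) := by
  induction l generalizing k with
  | nil => simp [stripF]
  | cons x xs ih =>
    by_cases hx : k x = 0
    · simp only [stripF, if_pos hx, List.count_cons, ih, beq_iff_eq]
      by_cases hv : x = v
      · subst hv; simp [hx]
      · simp [hv]
    · simp only [stripF, if_neg hx, ih, List.count_cons, beq_iff_eq, bdec]
      by_cases hv : x = v
      · subst hv; simp; omega
      · have hv' : ¬ v = x := fun h => hv h.symm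
        simp [hv, hv']

theorem stripF_cap (l : List Int) (k k' : Int → Nat)
    (h : ∀ v, min (k v) (l.count v) = min (k' v) (l.count v)) :
    stripF l k = stripF l k' := by
  induction l generalizing k k' with
  | nil => rfl
  | cons x xs ih =>
    have hx := h x
    simp only [List.count_cons_self] at hx
    have htail : ∀ v, v ≠ x → min (k v) (xs.count v) = min (k' v) (xs.count v) := by
      intro v hv
      have := h v
      rwa [List.count_cons_of_ne (fun h => hv h.symm)] at this
    by_cases h0 : k x = 0
    · have h0' : k' x = 0 := by omega
      simp only [stripF, h0, h0', if_pos]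
      rw [ih k k']
      intro v
      by_cases hv : v = x
      · subst hv; simp [h0, h0']
      · exact htail v hv
    · have h0' : ¬ k' x = 0 := by omega
      simp only [stripF, h0, h0', if_false]
      apply ih
      intro v
      by_cases hv : v = x
      · subst hv; simp [bdec]; omega
      · simp only [bdec, if_neg hv]; exact htail v hv

theorem stripF_comp (l : List Int) (k1 k2 : Int → Nat) :
    stripF (stripF l k1) k2 = stripF l (fun v => k1 v + k2 v) := by
  induction l generalizing k1 k2 with
  | nil => rfl
  | cons x xs ih =>
    by_cases h1 : k1 x = 0
    · rw [stripF_cons_zero xs h1]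
      by_cases h2 : k2 x = 0
      · have hs : k1 x + k2 x = 0 := by omega
        rw [stripF_cons_zero (stripF xs k1) h2, stripF_cons_zero xs hs, ih]
      · have hs : ¬ (k1 x + k2 x = 0) := by omega
        rw [stripF_cons_pos (stripF xs k1) h2, stripF_cons_pos xs hs, ih]
        congr 1
        funext v
        by_cases hv : v = x <;> simp [bdec, hv] <;> omega
    · have hs : ¬ (k1 x + k2 x = 0) := by omega
      rw [stripF_cons_pos xs h1, stripF_cons_pos xs hs, ih]
      congr 1
      funext v
      by_cases hv : v = x <;> simp [bdec, hv] <;> omega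

theorem erase_eq_stripF (l : List Int) (x : Int) :
    l.erase x = stripF l (fun v => if v = x then 1 else 0) := by
  induction l with
  | nil => rfl
  | cons y ys ih =>
    by_cases hy : y = x
    · subst hy
      have : (fun v => if v = y then 1 else 0) y ≠ 0 := by simp
      simp only [stripF, if_pos rfl]
      have hb : bdec (fun v => if v = y then 1 else 0) y = fun _ => 0 := by
        funext v; by_cases hv : v = y <;> simp [bdec, hv]
      simp [List.erase_cons_head, hb, stripF_zero]
    · have hne : (y == x) = false := by simp [hy]
      simp only [List.erase_cons, hne, stripF, if_neg hy, if_pos]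
      simp [ih, hy]

theorem stripF_erase (l : List Int) (k : Int → Nat) (x : Int) (hx : k x ≠ 0) :
    stripF l k = stripF (l.erase x) (bdec k x) := by
  rw [erase_eq_stripF, stripF_comp]
  apply stripF_cap
  intro v
  by_cases hv : v = x <;> simp [bdec, hv] <;> omega

theorem stripF_length_le (l : List Int) (k : Int → Nat) :
    (stripF l k).length ≤ l.length := by
  induction l generalizing k with
  | nil => simp [stripF]
  | cons x xs ih =>
    by_cases hx : k x = 0
    · simp only [stripF, hx, if_pos, List.length_cons]
      have := ih k; omega
    · simp only [stripF, hx, if_neg, if_false, List.length_cons]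
      have := ih (bdec k x); omega

theorem stripF_length_lt (l : List Int) : ∀ (k : Int → Nat) (x : Int),
    x ∈ l → k x ≠ 0 → (stripF l k).length < l.length := by
  induction l with
  | nil => intro k x hm _; simp at hm
  | cons y ys ih =>
    intro k x hm hk
    by_cases hy : k y = 0
    · have hxy : x ≠ y := fun h => (h ▸ hk) hy
      have hm' : x ∈ ys := by
        rcases List.mem_cons.mp hm with h | h
        · exact absurd h hxy
        · exact h
      rw [stripF_cons_zero ys hy]
      have := ih k x hm' hk
      simp only [List.length_cons]
      omega
    · rw [stripF_cons_pos ys hy]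
      have := stripF_length_le ys (bdec k y)
      simp only [List.length_cons]
      omega

-- ---------- A, small branch ----------

theorem pvRemoveBoth_eq (n d : List Int) (v : Int) :
    pvRemoveBoth (n, d) v = (n.erase v, d.erase v) := by
  unfold pvRemoveBoth
  by_cases hn : v ∈ n <;> by_cases hd : v ∈ d <;>
    simp [PySem.List.remove?_eq_some_erase, hn, hd,
      (PySem.List.remove?_eq_none_iff _ _).mpr, List.erase_of_not_mem]

theorem small_fold (xs : List Int) :
    ∀ (n d : List Int), (∀ v, xs.count v ≤ n.count v) →
    xs.foldl (fun st v => if v ∈ st.2 then pvRemoveBoth st v else st) (n, d)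
      = (stripF n (fun v => min (xs.count v) (d.count v)),
         stripF d (fun v => min (xs.count v) (d.count v))) := by
  induction xs with
  | nil =>
    intro n d _
    have hb : (fun v => min (List.count v ([] : List Int)) (d.count v)) = fun _ => 0 := by
      funext v; simp
    simp [hb, stripF_zero]
  | cons x xs ih =>
    intro n d h
    by_cases hx : x ∈ d
    · have hxn : x ∈ n := by
        have := h x
        rw [List.count_cons_self] at this
        exact List.count_pos_iff.mp (by omega)
      simp only [List.foldl_cons, if_pos hx, pvRemoveBoth_eq]
      rw [ih (n.erase x) (d.erase x) ?hcnt]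
      case hcnt =>
        intro v
        have hv0 := h v
        by_cases hv : v = x
        · subst hv
          rw [List.count_cons_self] at hv0
          rw [List.count_erase_self]
          omega
        · rw [List.count_cons_of_ne (fun h => hv h.symm)] at hv0
          rwa [List.count_erase_of_ne hv]
      have hdx : 0 < d.count x := List.count_pos_iff.mpr hx
      have hb1 : min (List.count x (x :: xs)) (d.count x) ≠ 0 := by
        rw [List.count_cons_self]; omega
      have hfun : bdec (fun v => min (List.count v (x :: xs)) (d.count v)) x
          = fun v => min (xs.count v) ((d.erase x).count v) := by
        funext v
        by_cases hv : v = x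
        · subst hv
          simp [bdec, List.count_cons_self, List.count_erase_self]
          omega
        · simp only [bdec, if_neg hv, List.count_cons_of_ne (fun h => hv h.symm),
            List.count_erase_of_ne hv]
      rw [stripF_erase n _ x hb1, stripF_erase d _ x hb1, hfun]
    · simp only [List.foldl_cons, if_neg hx]
      rw [ih n d ?hcnt]
      case hcnt =>
        intro v
        have hv0 := h v
        by_cases hv : v = x
        · subst hv; rw [List.count_cons_self] at hv0; omega
        · rwa [List.count_cons_of_ne (fun h => hv h.symm)] at hv0
      have hdx : d.count x = 0 := List.count_eq_zero.mpr hx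
      have hfun : (fun v => min (xs.count v) (d.count v))
          = fun v => min (List.count v (x :: xs)) (d.count v) := by
        funext v
        by_cases hv : v = x
        · subst hv; rw [List.count_cons_self, hdx]; omega
        · rw [List.count_cons_of_ne (fun h => hv h.symm)]
      rw [hfun]

-- ---------- A, big branch ----------

theorem pair_fold (I : List Int) :
    ∀ (n d : List Int), I.foldl pvRemoveBoth (n, d) = (I.foldl List.erase n, I.foldl List.erase d) := by
  induction I with
  | nil => intro n d; rfl
  | cons x I ih => intro n d; simp only [List.foldl_cons, pvRemoveBoth_eq]; exact ih _ _

theorem erase_fold (I : List Int) (hI : I.Nodup) :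
    ∀ (n : List Int), I.foldl List.erase n = stripF n (fun v => if v ∈ I then 1 else 0) := by
  induction I with
  | nil =>
    intro n
    have hb : (fun v => if v ∈ ([] : List Int) then 1 else 0) = fun _ => (0 : Nat) := by
      funext v; simp
    simp [hb, stripF_zero]
  | cons x I ih =>
    intro n
    have hx : x ∉ I := (List.nodup_cons.mp hI).1
    have hI' : I.Nodup := (List.nodup_cons.mp hI).2
    simp only [List.foldl_cons]
    rw [ih hI' (n.erase x)]
    have h1 : (fun v => if v ∈ x :: I then 1 else 0) x ≠ (0 : Nat) := by simp
    rw [stripF_erase n _ x h1]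
    congr 1
    funext v
    by_cases hv : v = x
    · subst hv; simp [bdec, hx]
    · simp [bdec, hv]

theorem ofList_sublist_aux (xs : List Int) :
    ∀ s : List Int, List.Sublist (xs.foldl PySem.Set.add s) (s ++ xs) := by
  induction xs with
  | nil => intro s; simp
  | cons x xs ih =>
    intro s
    simp only [List.foldl_cons]
    by_cases hc : PySem.Set.contains s x
    · have h1 := ih s
      have h2 : List.Sublist (s ++ xs) (s ++ x :: xs) :=
        List.Sublist.append_left (List.sublist_cons_self x xs) s
      have hadd : PySem.Set.add s x = s := by unfold PySem.Set.add; rw [if_pos hc]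
      rw [hadd]
      exact h1.trans h2
    · have h1 := ih (s ++ [x])
      have hadd : PySem.Set.add s x = s ++ [x] := by unfold PySem.Set.add; rw [if_neg hc]
      rw [hadd]
      simpa using h1

theorem nodup_of_len_eq (num : List Int)
    (h : (PySem.Set.ofList num).length = num.length) : num.Nodup := by
  have hsub : List.Sublist (PySem.Set.ofList num) num := by
    have := ofList_sublist_aux num []
    simpa [PySem.Set.ofList, PySem.Set.empty] using this
  have heq : PySem.Set.ofList num = num := hsub.eq_of_length h
  have := PySem.Set.nodup_ofList num
  rwa [heq] at this

theorem bigLoop_eq : ∀ (fuel : Nat) (num denum : List Int), num.length < fuel →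
    pvBigLoop fuel num denum = (stripF num (mB num denum), stripF denum (mB num denum)) := by
  intro fuel
  induction fuel with
  | zero => intro num denum h; omega
  | succ fuel ih =>
    intro num denum hlen
    have hmemI : ∀ v, v ∈ PySem.Set.inter (PySem.Set.ofList num) denum ↔ v ∈ num ∧ v ∈ denum := by
      intro v
      rw [PySem.Set.mem_inter]
      simp [PySem.Set.mem_ofList]
    have hnodI : (PySem.Set.inter (PySem.Set.ofList num) denum).Nodup := by
      unfold PySem.Set.inter
      exact (PySem.Set.nodup_ofList num).filter _
    set inter := PySem.Set.inter (PySem.Set.ofList num) denum with hinter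
    have hstep : inter.foldl pvRemoveBoth (num, denum)
        = (stripF num (fun v => if v ∈ inter then 1 else 0),
           stripF denum (fun v => if v ∈ inter then 1 else 0)) := by
      rw [pair_fold, erase_fold inter hnodI, erase_fold inter hnodI]
    show (if !decide (PySem.Set.len (PySem.Set.ofList num) ≠ (num.length : Int)) || inter.isEmpty
          then inter.foldl pvRemoveBoth (num, denum)
          else pvBigLoop fuel (inter.foldl pvRemoveBoth (num, denum)).1
                 (inter.foldl pvRemoveBoth (num, denum)).2) = _
    by_cases hie : inter.isEmpty
    · -- intersection empty: nothing changes, and mB is effectively zero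
      have hnil : inter = [] := List.isEmpty_iff.mp hie
      have hb : (fun v => if v ∈ inter then 1 else 0) = fun _ => (0 : Nat) := by
        funext v; simp [hnil]
      have hdisj : ∀ v, ¬ (v ∈ num ∧ v ∈ denum) := by
        intro v hv
        have := (hmemI v).mpr hv
        simp [hnil] at this
      simp only [hie, Bool.or_true, if_pos, hstep, hb, stripF_zero]
      rw [Prod.mk.injEq]
      constructor
      · rw [stripF_cap num (mB num denum) (fun _ => 0) ?_, stripF_zero]
        intro v
        by_cases hvn : v ∈ num
        · have hvd : v ∉ denum := fun hd => hdisj v ⟨hvn, hd⟩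
          have : denum.count v = 0 := List.count_eq_zero.mpr hvd
          simp [mB, this]
        · have : num.count v = 0 := List.count_eq_zero.mpr hvn
          simp [mB, this]
      · rw [stripF_cap denum (mB num denum) (fun _ => 0) ?_, stripF_zero]
        intro v
        by_cases hvd : v ∈ denum
        · have hvn : v ∉ num := fun hn => hdisj v ⟨hn, hvd⟩
          have : num.count v = 0 := List.count_eq_zero.mpr hvn
          simp [mB, this]
        · have : denum.count v = 0 := List.count_eq_zero.mpr hvd
          simp [mB, this]
    · by_cases hredo : PySem.Set.len (PySem.Set.ofList num) ≠ (num.length : Int)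
      · -- loop again
        have hredo2 : ¬ ((PySem.Set.ofList num).length = num.length) := by
          intro hl; exact hredo (by simp [PySem.Set.len, hl])
        have hcond : (!decide (PySem.Set.len (PySem.Set.ofList num) ≠ (num.length : Int)) || inter.isEmpty) = false := by
          simp [hredo2, hie, PySem.Set.len]
        rw [hcond]
        simp only [if_false, Bool.false_eq_true]
        rw [hstep]
        dsimp only
        have hne : inter ≠ [] := fun h => hie (by simp [h])
        obtain ⟨x, hxI⟩ := List.exists_mem_of_ne_nil inter hne
        have hxnum : x ∈ num := ((hmemI x).mp hxI).1
        have hklt : (stripF num (fun v => if v ∈ inter then 1 else 0)).length < num.length :=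
          stripF_length_lt num _ x hxnum (by simp [hxI])
        rw [ih _ _ (by omega)]
        rw [Prod.mk.injEq]
        constructor
        · rw [stripF_comp]
          apply stripF_cap
          intro v
          by_cases hvI : v ∈ inter
          · have hvn : 0 < num.count v := List.count_pos_iff.mpr ((hmemI v).mp hvI).1
            have hvd : 0 < denum.count v := List.count_pos_iff.mpr ((hmemI v).mp hvI).2
            simp only [mB, if_pos hvI, stripF_count]
            omega
          · simp only [mB, if_neg hvI, stripF_count]
            omega
        · rw [stripF_comp]
          apply stripF_cap
          intro v
          by_cases hvI : v ∈ inter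
          · have hvn : 0 < num.count v := List.count_pos_iff.mpr ((hmemI v).mp hvI).1
            have hvd : 0 < denum.count v := List.count_pos_iff.mpr ((hmemI v).mp hvI).2
            simp only [mB, if_pos hvI, stripF_count]
            omega
          · simp only [mB, if_neg hvI, stripF_count]
            omega
      · -- num has no duplicates: one pass suffices
        have hlen2 : (PySem.Set.ofList num).length = num.length := by
          have h := not_ne_iff.mp hredo
          simpa [PySem.Set.len] using h
        have hcond : (!decide (PySem.Set.len (PySem.Set.ofList num) ≠ (num.length : Int)) || inter.isEmpty) = true := by
          simp [PySem.Set.len, hlen2]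
        rw [hcond]
        simp only [if_true]
        rw [hstep]
        have hnod : num.Nodup := nodup_of_len_eq num hlen2
        have hb : (fun v => if v ∈ inter then 1 else 0) = mB num denum := by
          funext v
          by_cases hvI : v ∈ inter
          · have hv := (hmemI v).mp hvI
            have h1 : num.count v = 1 := by
              have hle := List.nodup_iff_count_le_one.mp hnod v
              have := List.count_pos_iff.mpr hv.1
              omega
            have h2 : 0 < denum.count v := List.count_pos_iff.mpr hv.2
            rw [if_pos hvI]
            simp only [mB, h1]
            omega
          · have hv := (hmemI v)
            simp only [if_neg hvI, mB]
            by_cases hvn : v ∈ num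
            · have hvd : v ∉ denum := fun hd => hvI ((hmemI v).mpr ⟨hvn, hd⟩)
              simp [List.count_eq_zero.mpr hvd]
            · simp [List.count_eq_zero.mpr hvn]
        rw [hb]

-- ---------- B ----------

theorem counter_getD (xs : List Int) (v : Int) :
    (pvCounter xs).getD v 0 = (xs.count v : Int) := by
  unfold pvCounter
  rw [PySem.Dict.getD_foldl_insert_add_one]
  simp [PySem.Dict.getD]

theorem take_fold_list (cd : PySem.Dict Int Int) (xs : List Int) :
    ∀ (acc : List Int) (t : PySem.Dict Int Int),
    (xs.foldl (pvTakeStep cd) (acc, t)).1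
      = acc ++ stripF xs (fun v => (cd.getD v 0 - t.getD v 0).toNat) := by
  induction xs with
  | nil => intro acc t; simp [stripF]
  | cons x xs ih =>
    intro acc t
    by_cases hx : t.getD x 0 < cd.getD x 0
    · have hk : ¬ ((cd.getD x 0 - t.getD x 0).toNat = 0) := by omega
      simp only [List.foldl_cons, pvTakeStep, if_pos hx]
      rw [ih]
      have hfun : (fun v => (cd.getD v 0 - (t.insert x (t.getD x 0 + 1)).getD v 0).toNat)
          = bdec (fun v => (cd.getD v 0 - t.getD v 0).toNat) x := by
        funext v
        rw [PySem.Dict.getD_insert]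
        by_cases hv : v = x
        · subst hv; simp [bdec]; omega
        · simp [bdec, hv]
      rw [hfun]
      simp [stripF, hk]
    · have hk : (cd.getD x 0 - t.getD x 0).toNat = 0 := by omega
      simp only [List.foldl_cons, pvTakeStep, if_neg hx]
      rw [ih]
      simp [stripF, hk]

theorem take_fold_dict (cd : PySem.Dict Int Int) (xs : List Int) :
    ∀ (acc : List Int) (t : PySem.Dict Int Int) (v : Int),
    ((xs.foldl (pvTakeStep cd) (acc, t)).2).getD v 0
      = max (t.getD v 0) (min (t.getD v 0 + xs.count v) (cd.getD v 0)) := by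
  induction xs with
  | nil => intro acc t v; simp only [List.foldl_nil, List.count_nil]; push_cast; omega
  | cons x xs ih =>
    intro acc t v
    by_cases hx : t.getD x 0 < cd.getD x 0
    · simp only [List.foldl_cons, pvTakeStep, if_pos hx]
      rw [ih]
      by_cases hv : v = x
      · subst hv
        rw [PySem.Dict.getD_insert_self]
        rw [List.count_cons_self]
        push_cast
        omega
      · rw [PySem.Dict.getD_insert]
        rw [List.count_cons_of_ne (fun h => hv h.symm)]
        simp [hv]
    · simp only [List.foldl_cons, pvTakeStep, if_neg hx]
      rw [ih]
      by_cases hv : v = x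
      · subst hv
        rw [List.count_cons_self]
        push_cast
        omega
      · rw [List.count_cons_of_ne (fun h => hv h.symm)]

theorem drop_fold_list (xs : List Int) :
    ∀ (acc : List Int) (t : PySem.Dict Int Int),
    (xs.foldl pvDropStep (acc, t)).1 = acc ++ stripF xs (fun v => (t.getD v 0).toNat) := by
  induction xs with
  | nil => intro acc t; simp [stripF]
  | cons x xs ih =>
    intro acc t
    by_cases hx : t.getD x 0 > 0
    · have hk : ¬ ((t.getD x 0).toNat = 0) := by omega
      simp only [List.foldl_cons, pvDropStep, if_pos hx]
      rw [ih]
      have hfun : (fun v => ((t.insert x (t.getD x 0 - 1)).getD v 0).toNat)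
          = bdec (fun v => (t.getD v 0).toNat) x := by
        funext v
        rw [PySem.Dict.getD_insert]
        by_cases hv : v = x
        · subst hv; simp [bdec]
        · simp [bdec, hv]
      rw [hfun]
      simp [stripF, hk]
    · have hk : (t.getD x 0).toNat = 0 := by omega
      simp only [List.foldl_cons, pvDropStep, if_neg hx]
      rw [ih]
      simp [stripF, hk]

theorem alt_eq (num denum : List Int) :
    simplify_factors_alt num denum = (stripF num (mB num denum), stripF denum (mB num denum)) := by
  unfold simplify_factors_alt
  rw [Prod.mk.injEq]
  constructor
  · rw [take_fold_list]
    have hb : (fun v => ((pvCounter denum).getD v 0 - PySem.Dict.empty.getD v (0:Int)).toNat)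
        = fun v => denum.count v := by
      funext v
      rw [counter_getD]
      simp [PySem.Dict.empty, PySem.Dict.getD, PySem.Dict.get?]
    rw [hb]
    simp only [List.nil_append]
    apply stripF_cap
    intro v
    simp [mB]
    omega
  · rw [drop_fold_list]
    have hb : (fun v => (((num.foldl (pvTakeStep (pvCounter denum)) ([], PySem.Dict.empty)).2).getD v 0).toNat)
        = mB num denum := by
      funext v
      rw [take_fold_dict, counter_getD]
      have hemp : (PySem.Dict.empty : PySem.Dict Int Int).getD v 0 = 0 := by
        simp [PySem.Dict.empty, PySem.Dict.getD, PySem.Dict.get?]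
      rw [hemp]
      simp [mB]
      omega
    rw [hb]
    simp

-- ===== VERDICT (by name: the statement is the Claim_ definition above) =====
theorem simplify_factors_spec : Claim_equal_simplify_factors := by
  intro num denum _
  unfold Spec_simplify_factors
  rw [alt_eq]
  unfold simplify_factors
  by_cases hbig : denum.length > 2 ∧ num.length > 2
  · rw [if_pos hbig]
    exact bigLoop_eq (num.length + 1) num denum (by omega)
  · rw [if_neg hbig]
    rw [small_fold num num denum (fun v => le_refl _)]
    rfl
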